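-- pv_equiv track=rewrite | github.com/Avabowler/JumpCoder-Plugin | JumpCoder-server/utils.py | extract_first_function
-- ===== SOURCE A (Python) =====
-- def extract_first_function(code):
--     init_indent_count = -1
--     lines = []
--     has_other_external_code = False
--     for cur_line in code.split("\n"):
--         if len(cur_line.strip()) == 0: continue
--         cur_indent = len(cur_line) - len(cur_line.lstrip())
--         if init_indent_count == -1:
--             init_indent_count = cur_indent
--         elif init_indent_count == cur_indent:
--             has_other_external_code = True
--             break
--         lines.append(cur_line)
--     return lines, has_other_external_code
-- ===== SOURCE B (Python) =====
-- def _indent(l):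
--     return len(l) - len(l.lstrip())
--
-- def _body(init, lines):
--     # recursively build the block after the first line; cons on return
--     if not lines:
--         return [], False
--     head = lines[0]
--     if not head.strip():
--         return _body(init, lines[1:])
--     if _indent(head) == init:
--         return [], True
--     tail, flag = _body(init, lines[1:])
--     return [head] + tail, flag
--
-- def _block(lines):
--     # skip leading blank lines, then anchor on the first non-blank line
--     if not lines:
--         return [], False
--     if not lines[0].strip():
--         return _block(lines[1:])
--     tail, flag = _body(_indent(lines[0]), lines[1:])
--     return [lines[0]] + tail, flag
--
-- def extract_first_function(code):
--     return _block(code.split("\n"))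
-- ===== Notes on version B (the rewrite author's own statement) =====
-- stated objective: alternative
-- what changed: B is a fully recursive implementation with no accumulator and no break: it skips leading blanks recursively, anchors on the first non-blank line's indent, and assembles the block by consing lines on return (back-to-front), whereas A runs one imperative loop mutating init_indent/lines/flag with a break.
import Mathlib
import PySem

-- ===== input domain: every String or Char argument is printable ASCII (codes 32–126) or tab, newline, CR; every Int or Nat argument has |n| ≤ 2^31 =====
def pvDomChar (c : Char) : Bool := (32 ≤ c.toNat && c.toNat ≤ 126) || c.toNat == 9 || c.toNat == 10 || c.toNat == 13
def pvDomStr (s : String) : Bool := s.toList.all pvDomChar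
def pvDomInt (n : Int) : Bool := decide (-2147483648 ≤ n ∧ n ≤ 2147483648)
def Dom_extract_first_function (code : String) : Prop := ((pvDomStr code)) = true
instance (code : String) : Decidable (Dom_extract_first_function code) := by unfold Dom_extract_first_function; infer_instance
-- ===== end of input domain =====

-- B replaces A's accumulate-and-break loop by a pure recursion that builds the block by consing on return; same O(n) cost, different decomposition.

-- ===== PORT A =====
-- A's single loop, state (init_indent_count, lines); break returns (lines, true)
def pvALoop : Int → List String → List String → List String × Bool
  | _, lines, [] => (lines, false)
  | init, lines, l :: rest =>
    if PySem.Str.len (PySem.Str.strip l) = 0 then pvALoop init lines rest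
    else
      let ind := PySem.Str.len l - PySem.Str.len (PySem.Str.lstrip l)
      if init = -1 then pvALoop ind (lines ++ [l]) rest
      else if init = ind then (lines, true)
      else pvALoop init (lines ++ [l]) rest

def extract_first_function (code : String) : List String × Bool :=
  pvALoop (-1) [] (((PySem.Str.split? code "\n").getD []))

-- ===== PORT B =====
def pvIndent (l : String) : Int := PySem.Str.len l - PySem.Str.len (PySem.Str.lstrip l)

-- recursive body: cons lines on return until a line with indent = init
def pvBody : Int → List String → List String × Bool
  | _, [] => ([], false)
  | init, l :: rest =>
    if PySem.Str.len (PySem.Str.strip l) = 0 then pvBody init rest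
    else if pvIndent l = init then ([], true)
    else
      let r := pvBody init rest
      (l :: r.1, r.2)

-- skip leading blank lines, anchor on the first non-blank line
def pvBlock : List String → List String × Bool
  | [] => ([], false)
  | l :: rest =>
    if PySem.Str.len (PySem.Str.strip l) = 0 then pvBlock rest
    else
      let r := pvBody (pvIndent l) rest
      (l :: r.1, r.2)

def extract_first_function_alt (code : String) : List String × Bool :=
  pvBlock (((PySem.Str.split? code "\n").getD []))

-- ===== PRECONDITION & SPEC =====
def Spec_extract_first_function (code : String) (out : List String × Bool) : Prop := out = extract_first_function_alt code
instance (code : String) (out : List String × Bool) : Decidable (Spec_extract_first_function code out) := by unfold Spec_extract_first_function; infer_instance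

-- ===== CLAIM (what is proved, stated in full; the proofs are below) =====
def Claim_equal_extract_first_function : Prop := ∀ (code : String), Dom_extract_first_function code → Spec_extract_first_function code (extract_first_function code)

-- ===== LEMMAS AND PROOFS =====

theorem pvIndent_nonneg (l : String) : 0 ≤ pvIndent l := by
  unfold pvIndent
  simp only [PySem.Str.len_eq, PySem.Str.toList_lstrip, PySem.Chars.lstrip]
  have := List.length_dropWhile_le (p := PySem.Chars.isspace) (l := l.toList)
  omega

-- A's loop after init is fixed equals lines ++ B's recursive body
theorem pvALoop_body (rest : List String) : ∀ (init : Int) (lines : List String), init ≠ -1 →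
    pvALoop init lines rest = (lines ++ (pvBody init rest).1, (pvBody init rest).2) := by
  induction rest with
  | nil => intro init lines _; simp [pvALoop, pvBody]
  | cons l t ih =>
    intro init lines h
    simp only [pvALoop, pvBody,
      show PySem.Str.len l - PySem.Str.len (PySem.Str.lstrip l) = pvIndent l from rfl]
    by_cases hb : PySem.Str.len (PySem.Str.strip l) = 0
    · rw [if_pos hb, if_pos hb, ih _ _ h]
    · rw [if_neg hb, if_neg hb, if_neg h]
      by_cases he : pvIndent l = init
      · rw [if_pos he.symm, if_pos he]; simp
      · rw [if_neg (fun x => he x.symm), if_neg he, ih _ _ h]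
        simp

-- A's whole loop from the initial state equals B's pvBlock
theorem pvALoop_block (ls : List String) :
    pvALoop (-1) [] ls = pvBlock ls := by
  induction ls with
  | nil => rfl
  | cons l t ih =>
    simp only [pvALoop, pvBlock]
    by_cases hb : PySem.Str.len (PySem.Str.strip l) = 0
    · rw [if_pos hb, if_pos hb, ih]
    · rw [if_neg hb, if_neg hb]
      have hne : pvIndent l ≠ -1 := by have := pvIndent_nonneg l; omega
      simp only [ite_true,
        show PySem.Str.len l - PySem.Str.len (PySem.Str.lstrip l) = pvIndent l from rfl,
        pvALoop_body t _ _ hne]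
      simp

-- ===== VERDICT (by name: the statement is the Claim_ definition above) =====
theorem extract_first_function_spec : Claim_equal_extract_first_function := by
  intro code _
  unfold Spec_extract_first_function extract_first_function extract_first_function_alt
  exact pvALoop_block _
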